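-- pv_equiv track=rewrite | github.com/Stobelius/DMT_Khovanov | braidalgo.py | hdeg_to_maximal_ones
-- ===== SOURCE A (Python) =====
-- def count_starting_ones(my_string):
--     count = 0
--     for char in my_string:
--         if char == "1":
--             count += 1
--         else:
--             break
--     return count
--
-- def hdeg_of_word(braid_word,enh_word):
--     def count_characters_in_string(mystring):
--         count_1 = mystring.count("1")
--         count_X = mystring.count("X")
--         count_Y = mystring.count("Y")
--
--         return count_1+ count_X+ count_Y
--
--     num_of_neg_crossings=len(list(filter(str.islower, braid_word)))
--     num_of_one_smoothings=count_characters_in_string(enh_word)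
--
--     return num_of_one_smoothings-num_of_neg_crossings
--
-- def hdeg_to_maximal_ones(braid,unmatched_words):
--     if not braid==braid.lower():
--         return None
--
--     hdeg_to_ones = {}
--     for string in unmatched_words:
--         hdeg=hdeg_of_word(braid,string)
--         ones=count_starting_ones(string)
--
--         if hdeg not in hdeg_to_ones or ones > hdeg_to_ones[hdeg]:
--             hdeg_to_ones[hdeg] = ones
--
--     return hdeg_to_ones
-- ===== SOURCE B (Python) =====
-- def count_starting_ones(my_string):
--     count = 0
--     for char in my_string:
--         if char == "1":
--             count += 1
--         else:
--             break
--     return count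
--
--
-- def hdeg_of_word(braid_word, enh_word):
--     def count_characters_in_string(mystring):
--         count_1 = mystring.count("1")
--         count_X = mystring.count("X")
--         count_Y = mystring.count("Y")
--
--         return count_1 + count_X + count_Y
--
--     num_of_neg_crossings = len(list(filter(str.islower, braid_word)))
--     num_of_one_smoothings = count_characters_in_string(enh_word)
--
--     return num_of_one_smoothings - num_of_neg_crossings
--
--
-- def hdeg_to_maximal_ones(braid, unmatched_words):
--     if not braid == braid.lower():
--         return None
--
--     pairs = [(hdeg_of_word(braid, word), count_starting_ones(word))
--              for word in unmatched_words]
--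
--     groups = {}
--     for h, ones in pairs:
--         groups.setdefault(h, []).append(ones)
--
--     return {h: max(v) for h, v in groups.items()}
-- ===== Notes on version B (the rewrite author's own statement) =====
-- stated objective: alternative
-- what changed: A keeps a running maximum per homological degree updated conditionally inside one loop; B first groups all starting-ones counts by hdeg into lists (setdefault/append) and then takes max of each group in a final dict comprehension.
import Mathlib
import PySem

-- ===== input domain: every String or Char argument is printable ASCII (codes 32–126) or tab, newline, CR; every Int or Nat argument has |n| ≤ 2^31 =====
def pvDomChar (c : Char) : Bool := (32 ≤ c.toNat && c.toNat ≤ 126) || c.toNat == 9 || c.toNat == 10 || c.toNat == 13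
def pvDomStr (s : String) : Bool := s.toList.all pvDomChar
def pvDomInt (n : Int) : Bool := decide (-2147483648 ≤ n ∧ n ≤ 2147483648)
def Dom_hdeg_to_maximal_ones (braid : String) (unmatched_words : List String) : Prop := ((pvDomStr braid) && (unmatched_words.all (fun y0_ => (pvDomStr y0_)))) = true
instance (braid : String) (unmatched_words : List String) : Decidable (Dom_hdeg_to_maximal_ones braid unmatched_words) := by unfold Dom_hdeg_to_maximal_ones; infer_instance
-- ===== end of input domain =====

-- B groups the starting-ones counts by hdeg into lists and takes the max of each group afterwards,
-- instead of A's conditionally-updated running maximum inside the loop (alternative decomposition, same cost).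

-- ===== PORT A =====
-- shared helpers of the module, used verbatim by both A and B (Source B keeps them unchanged)

-- count_starting_ones: loop with break
def countStartingOnesAux : List Char → Int → Int
  | [], count => count
  | c :: rest, count => if c = '1' then countStartingOnesAux rest (count + 1) else count

def count_starting_ones_port (s : String) : Int := countStartingOnesAux s.toList 0

-- hdeg_of_word: count of "1"/"X"/"Y" in enh_word minus number of lowercase chars of braid_word
def hdeg_of_word_port (braid_word enh_word : String) : Int :=
  let num_of_neg_crossings : Int := ((braid_word.toList.filter (fun c => PySem.Str.islower c)).length : Int)
  let num_of_one_smoothings : Int :=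
    ((PySem.Str.count enh_word "1" : Int) + (PySem.Str.count enh_word "X" : Int) + (PySem.Str.count enh_word "Y" : Int))
  num_of_one_smoothings - num_of_neg_crossings

def hdeg_to_maximal_ones (braid : String) (unmatched_words : List String) : Option (List (Int × Int)) :=
  if ¬ (braid = PySem.Str.lower braid) then none
  else
    some ((unmatched_words.foldl (fun d s =>
        let hdeg := hdeg_of_word_port braid s
        let ones := count_starting_ones_port s
        -- `hdeg not in hdeg_to_ones or ones > hdeg_to_ones[hdeg]`; the getD default is never
        -- read: the right disjunct is only reached when the key is present
        if d.contains hdeg = false ∨ ones > d.getD hdeg 0 then d.insert hdeg ones else d)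
      PySem.Dict.empty).items)

-- ===== PORT B =====
def hdeg_to_maximal_ones_alt (braid : String) (unmatched_words : List String) : Option (List (Int × Int)) :=
  if ¬ (braid = PySem.Str.lower braid) then none
  else
    let pairs := unmatched_words.map (fun word => (hdeg_of_word_port braid word, count_starting_ones_port word))
    let groups := pairs.foldl (fun d p => d.modify p.1 [] (fun v => v ++ [p.2])) PySem.Dict.empty
    -- max(v): each group is nonempty (created with its first element), so max? is some; .getD 0 unwraps it
    some (groups.items.map (fun q => (q.1, (PySem.List.max? q.2 (fun x => x)).getD 0)))

-- ===== PRECONDITION & SPEC =====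
def Spec_hdeg_to_maximal_ones (braid : String) (unmatched_words : List String) (out : Option (List (Int × Int))) : Prop := out = hdeg_to_maximal_ones_alt braid unmatched_words
instance (braid : String) (unmatched_words : List String) (out : Option (List (Int × Int))) : Decidable (Spec_hdeg_to_maximal_ones braid unmatched_words out) := by unfold Spec_hdeg_to_maximal_ones; infer_instance

-- ===== CLAIM (what is proved, stated in full; the proofs are below) =====
def Claim_equal_hdeg_to_maximal_ones : Prop := ∀ (braid : String) (unmatched_words : List String), Dom_hdeg_to_maximal_ones braid unmatched_words → Spec_hdeg_to_maximal_ones braid unmatched_words (hdeg_to_maximal_ones braid unmatched_words)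

-- ===== LEMMAS AND PROOFS =====

def runMax : Option Int → List Int → Option Int
  | o, [] => o
  | none, v :: t => runMax (some v) t
  | some c, v :: t => runMax (some (max c v)) t

theorem runMax_some (t : List Int) (c : Int) : runMax (some c) t = some (t.foldl max c) := by
  induction t generalizing c with
  | nil => rfl
  | cons v t ih => simp [runMax, ih, List.foldl]

def stepA (kf vf : String → Int) (d : PySem.Dict Int Int) (s : String) : PySem.Dict Int Int :=
  if d.contains (kf s) = false ∨ vf s > d.getD (kf s) 0 then d.insert (kf s) (vf s) else d

theorem keys_stepA (kf vf : String → Int) (d : PySem.Dict Int Int) (s : String) :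
    (stepA kf vf d s).keys = PySem.Set.add d.keys (kf s) := by
  unfold stepA
  by_cases hc : d.contains (kf s) = false
  · have hmem : kf s ∉ d.keys := by
      intro hm
      rw [(PySem.Dict.contains_iff_mem_keys d (kf s)).2 hm] at hc; simp at hc
    rw [if_pos (Or.inl hc), PySem.Dict.keys_insert_of_not_contains _ _ hc]
    simp [PySem.Set.add, hmem]
  · have hc' : d.contains (kf s) = true := by revert hc; cases d.contains (kf s) <;> simp
    have hmem : kf s ∈ d.keys := (PySem.Dict.contains_iff_mem_keys d (kf s)).1 hc'
    have hadd : PySem.Set.add d.keys (kf s) = d.keys := by simp [PySem.Set.add, hmem]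
    by_cases hgt : vf s > d.getD (kf s) 0
    · rw [if_pos (Or.inr hgt), PySem.Dict.keys_insert_of_contains _ _ hc', hadd]
    · rw [if_neg (by simp [hc, hgt]), hadd]

theorem keys_foldl_stepA (kf vf : String → Int) (ws : List String) (d : PySem.Dict Int Int) :
    (ws.foldl (stepA kf vf) d).keys = PySem.Set.update d.keys (ws.map kf) := by
  rw [PySem.Set.update_map_eq_foldl_add]
  induction ws generalizing d with
  | nil => rfl
  | cons s t ih => simp only [List.foldl_cons, ih, keys_stepA]

theorem nodup_keys_foldl_stepA (kf vf : String → Int) (ws : List String) (d : PySem.Dict Int Int)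
    (h : d.keys.Nodup) : (ws.foldl (stepA kf vf) d).keys.Nodup := by
  induction ws generalizing d with
  | nil => exact h
  | cons s t ih =>
      refine ih _ ?_
      unfold stepA
      split
      · exact PySem.Dict.nodup_keys_insert _ _ _ h
      · exact h

theorem get?_stepA (kf vf : String → Int) (d : PySem.Dict Int Int) (s : String) (k : Int)
    (hk : kf s = k) :
    (stepA kf vf d s).get? k = runMax (d.get? k) [vf s] := by
  unfold stepA
  subst hk
  cases hg : d.get? (kf s) with
  | none =>
      have hc : d.contains (kf s) = false := by
        rw [PySem.Dict.contains_eq_isSome_get?, hg]; rfl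
      rw [if_pos (Or.inl hc), PySem.Dict.get?_insert_self]
      rfl
  | some c =>
      have hc : d.contains (kf s) = true := by
        rw [PySem.Dict.contains_eq_isSome_get?, hg]; rfl
      have hgd : d.getD (kf s) 0 = c := PySem.Dict.getD_of_get?_eq_some _ 0 hg
      by_cases hgt : vf s > d.getD (kf s) 0
      · rw [if_pos (Or.inr hgt), PySem.Dict.get?_insert_self]
        have : max c (vf s) = vf s := by rw [hgd] at hgt; omega
        simp [runMax, this]
      · rw [if_neg (by simp [hc, hgt]), hg]
        have : max c (vf s) = c := by rw [hgd] at hgt; omega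
        simp [runMax, this]

theorem get?_stepA_ne (kf vf : String → Int) (d : PySem.Dict Int Int) (s : String) (k : Int)
    (hk : kf s ≠ k) : (stepA kf vf d s).get? k = d.get? k := by
  unfold stepA
  split
  · exact PySem.Dict.get?_insert_of_ne _ _ (Ne.symm hk)
  · rfl

theorem runMax_append (o : Option Int) (l1 l2 : List Int) :
    runMax o (l1 ++ l2) = runMax (runMax o l1) l2 := by
  induction l1 generalizing o with
  | nil => rfl
  | cons v t ih => cases o <;> simp [runMax, ih]

theorem get?_foldl_stepA (kf vf : String → Int) (ws : List String) (d : PySem.Dict Int Int) (k : Int) :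
    (ws.foldl (stepA kf vf) d).get? k = runMax (d.get? k) ((ws.filter (fun s => kf s == k)).map vf) := by
  induction ws generalizing d with
  | nil => rfl
  | cons s t ih =>
      rw [List.foldl_cons, ih]
      by_cases hk : kf s = k
      · rw [List.filter_cons_of_pos (by simp [hk]), List.map_cons,
          get?_stepA kf vf d s k hk]
        have : (vf s) :: (t.filter (fun s => kf s == k)).map vf
            = [vf s] ++ (t.filter (fun s => kf s == k)).map vf := rfl
        rw [this, runMax_append]
      · rw [List.filter_cons_of_neg (by simp [hk]), get?_stepA_ne kf vf d s k hk]


theorem main_items (kf vf : String → Int) (ws : List String) :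
    (ws.foldl (stepA kf vf) PySem.Dict.empty).items =
      ((ws.map (fun s => (kf s, vf s))).foldl
          (fun d p => d.modify p.1 [] (fun v => v ++ [p.2])) PySem.Dict.empty).items.map
        (fun q => (q.1, (PySem.List.max? q.2 (fun x => x)).getD 0)) := by
  have hndA := nodup_keys_foldl_stepA kf vf ws PySem.Dict.empty (by simp)
  have hndG : ((ws.map (fun s => (kf s, vf s))).foldl
      (fun d p => d.modify p.1 [] (fun v => v ++ [p.2])) PySem.Dict.empty).keys.Nodup :=
    PySem.Dict.nodup_keys_foldl_modify_key _ _ _ _ _ (by simp)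
  rw [PySem.Dict.items_eq_map_keys _ hndA 0, PySem.Dict.items_eq_map_keys _ hndG [], List.map_map]
  have hKA := keys_foldl_stepA kf vf ws PySem.Dict.empty
  have hKG := PySem.Dict.keys_foldl_modify_key (ws.map (fun s => (kf s, vf s))) Prod.fst []
      (fun d p => fun v => v ++ [p.2]) PySem.Dict.empty
  have hmapfst : List.map (Prod.fst ∘ fun s => (kf s, vf s)) ws = List.map kf ws := rfl
  rw [hKA, hKG, List.map_map, hmapfst]
  apply List.map_congr_left
  intro k hk
  have hkmem : k ∈ ws.map kf := by
    simpa [PySem.Dict.keys_empty, PySem.Set.update_nil_left, PySem.Set.mem_ofList] using hk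
  obtain ⟨s0, hs0, hkf0⟩ := List.mem_map.1 hkmem
  have hG : ((ws.map (fun s => (kf s, vf s))).foldl
      (fun d p => d.modify p.1 [] (fun v => v ++ [p.2])) PySem.Dict.empty).getD k []
      = (ws.filter (fun s => kf s == k)).map vf := by
    rw [PySem.Dict.getD_foldl_modify_append, PySem.Dict.getD_empty, List.nil_append,
      List.filter_map, List.map_map]
    rfl
  have hA : (ws.foldl (stepA kf vf) PySem.Dict.empty).getD k 0
      = (runMax none ((ws.filter (fun s => kf s == k)).map vf)).getD 0 := by
    rw [PySem.Dict.getD_eq_get?_getD, get?_foldl_stepA, PySem.Dict.get?_empty]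
  have hne : (ws.filter (fun s => kf s == k)).map vf ≠ [] := by
    have : s0 ∈ ws.filter (fun s => kf s == k) := by
      rw [List.mem_filter]; exact ⟨hs0, by simp [hkf0]⟩
    exact List.ne_nil_of_mem (List.mem_map_of_mem this)
  simp only [Function.comp]
  rw [hG, hA]
  cases hvs : (ws.filter (fun s => kf s == k)).map vf with
  | nil => exact absurd hvs hne
  | cons v t =>
      rw [show runMax none (v :: t) = runMax (some v) t from rfl, runMax_some,
        PySem.List.max?_id_cons]

-- ===== VERDICT (by name: the statement is the Claim_ definition above) =====
theorem hdeg_to_maximal_ones_spec : Claim_equal_hdeg_to_maximal_ones := by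
  intro braid ws _
  unfold Spec_hdeg_to_maximal_ones hdeg_to_maximal_ones hdeg_to_maximal_ones_alt
  by_cases h : braid = PySem.Str.lower braid
  · rw [if_neg (not_not_intro h), if_neg (not_not_intro h)]
    exact congrArg some (main_items (fun s => hdeg_of_word_port braid s) count_starting_ones_port ws)
  · rw [if_pos h, if_pos h]
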